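-- pv_equiv track=rewrite | github.com/oshkosher/advent2023 | day13.py | colBits
-- ===== SOURCE A (Python) =====
-- def colBits(grid, c):
--   s = 0
--   b=1
--   for row in grid[::-1]:
--     if row[c] == '#':
--       s += b
--     b *= 2
--   return s
-- ===== SOURCE B (Python) =====
-- def colBits(grid, c):
--   s = 0
--   for row in grid:
--     s = s * 2 + (1 if row[c] == '#' else 0)
--   return s
-- ===== Notes on version B (the rewrite author's own statement) =====
-- stated objective: idiomatic
-- what changed: Replaces the reversed iteration with a separate power-of-two weight variable by a single forward Horner accumulator (s = s*2 + bit), removing the list reversal and the second state variable.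
import Mathlib
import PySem

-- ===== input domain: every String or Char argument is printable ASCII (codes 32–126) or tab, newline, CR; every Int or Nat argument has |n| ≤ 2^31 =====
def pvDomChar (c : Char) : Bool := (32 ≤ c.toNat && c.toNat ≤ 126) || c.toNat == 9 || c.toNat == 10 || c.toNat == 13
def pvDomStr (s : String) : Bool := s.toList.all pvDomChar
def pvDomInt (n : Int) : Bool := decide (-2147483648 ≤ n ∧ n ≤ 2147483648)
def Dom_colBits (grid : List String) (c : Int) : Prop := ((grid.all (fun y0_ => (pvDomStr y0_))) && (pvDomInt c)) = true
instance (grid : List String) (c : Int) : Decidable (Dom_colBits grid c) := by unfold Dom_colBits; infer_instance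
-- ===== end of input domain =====

-- B replaces the reversed loop with two state variables (s, b) by a forward Horner accumulator: idiomatic, no reversal.

-- ===== PORT A =====
-- A: reverse the grid, then accumulate s with a doubling weight b.
def colBits (grid : List String) (c : Int) : Int :=
  (((PySem.List.slice? grid none none (-1)).getD []).foldl
    (fun (sb : Int × Int) row =>
      (if PySem.Str.pyGet? row c = some '#' then sb.1 + sb.2 else sb.1, sb.2 * 2))
    (0, 1)).1

-- ===== PORT B =====
-- B: forward Horner scheme, one accumulator.
def colBits_alt (grid : List String) (c : Int) : Int :=
  grid.foldl
    (fun s row => s * 2 + (if PySem.Str.pyGet? row c = some '#' then (1 : Int) else 0))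
    0

-- ===== PRECONDITION & SPEC =====
-- Pre_ excludes exactly the inputs on which Python's row[c] raises IndexError for some row.
def Pre_colBits (grid : List String) (c : Int) : Prop :=
  ∀ row ∈ grid, PySem.Raise.InRange row.length c
instance (grid : List String) (c : Int) : Decidable (Pre_colBits grid c) := by
  unfold Pre_colBits; infer_instance
def pvWitness_colBits : List String × Int := (["#.", ".#", "##"], 1)
def Spec_colBits (grid : List String) (c : Int) (out : Int) : Prop := out = colBits_alt grid c
instance (grid : List String) (c : Int) (out : Int) : Decidable (Spec_colBits grid c out) := by unfold Spec_colBits; infer_instance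

-- ===== CLAIM (what is proved, stated in full; the proofs are below) =====
def Claim_equal_colBits : Prop := ∀ (grid : List String) (c : Int), Dom_colBits grid c → Pre_colBits grid c → Spec_colBits grid c (colBits grid c)

-- ===== LEMMAS AND PROOFS =====

-- the bit contributed by one row
def pvBit (c : Int) (row : String) : Int :=
  if PySem.Str.pyGet? row c = some '#' then 1 else 0

lemma aStep_eq (c : Int) (sb : Int × Int) (row : String) :
    (if PySem.Str.pyGet? row c = some '#' then sb.1 + sb.2 else sb.1, sb.2 * 2)
      = (sb.1 + sb.2 * pvBit c row, sb.2 * 2) := by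
  unfold pvBit PySem.Str.pyGet?
  split_ifs with h <;> simp

-- Horner fold is linear in its start value
lemma horner_shift (c : Int) (l : List String) (x : Int) :
    l.foldl (fun s row => s * 2 + pvBit c row) x
      = x * 2 ^ l.length + l.foldl (fun s row => s * 2 + pvBit c row) 0 := by
  induction l generalizing x with
  | nil => simp
  | cons r t ih =>
    simp only [List.foldl_cons, List.length_cons]
    rw [ih (x * 2 + pvBit c r), ih (0 * 2 + pvBit c r)]
    ring

-- A's fold over the reversed list, characterised via B's Horner value
lemma a_fold_reverse (c : Int) (l : List String) (s b : Int) :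
    l.reverse.foldl (fun (sb : Int × Int) row => (sb.1 + sb.2 * pvBit c row, sb.2 * 2)) (s, b)
      = (s + b * l.foldl (fun s row => s * 2 + pvBit c row) 0, b * 2 ^ l.length) := by
  induction l generalizing s b with
  | nil => simp
  | cons r t ih =>
    simp only [List.reverse_cons, List.foldl_append, List.foldl_cons, List.foldl_nil,
      List.length_cons, ih]
    rw [horner_shift c t (0 * 2 + pvBit c r)]
    rw [Prod.mk.injEq]
    constructor <;> ring

-- ===== VERDICT (by name: the statement is the Claim_ definition above) =====
theorem colBits_spec : Claim_equal_colBits := by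
  intro grid c _ _
  unfold Spec_colBits colBits colBits_alt
  rw [PySem.List.slice?_none_none_neg_one]
  simp only [Option.getD_some]
  have h1 : (fun (sb : Int × Int) (row : String) =>
      (if PySem.Str.pyGet? row c = some '#' then sb.1 + sb.2 else sb.1, sb.2 * 2))
        = fun sb row => (sb.1 + sb.2 * pvBit c row, sb.2 * 2) :=
    funext fun sb => funext fun row => aStep_eq c sb row
  calc (grid.reverse.foldl
          (fun (sb : Int × Int) row =>
            (if PySem.Str.pyGet? row c = some '#' then sb.1 + sb.2 else sb.1, sb.2 * 2))
          (0, 1)).1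
      = (grid.reverse.foldl
          (fun (sb : Int × Int) row => (sb.1 + sb.2 * pvBit c row, sb.2 * 2)) (0, 1)).1 := by
        rw [h1]
    _ = grid.foldl (fun s row => s * 2 + pvBit c row) 0 := by
        rw [a_fold_reverse]; ring
    _ = grid.foldl
          (fun s row => s * 2 + (if PySem.Str.pyGet? row c = some '#' then (1 : Int) else 0)) 0 := by
        simp [pvBit]
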